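-- pv_equiv track=rewrite | github.com/ericaltendorf/plotman | src/plotman/plot_util.py | column_wrap
-- ===== SOURCE A (Python) =====
-- import math
-- import typing
--
-- def column_wrap(
--     items: typing.Sequence[object],
--     n_cols: int,
--     filler: typing.Optional[str] = None,
-- ) -> typing.List[typing.List[typing.Optional[object]]]:
--     '''Take items, distribute among n_cols columns, and return a set
--        of rows containing the slices of those columns.'''
--     rows: typing.List[typing.List[typing.Optional[object]]] = []
--     n_rows = math.ceil(len(items) / n_cols)
--     for row in range(n_rows):
--         row_items = items[row : : n_rows]
--         # Pad and truncate
--         padded: typing.List[typing.Optional[object]] = [*row_items, *([filler] * n_cols)]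
--         rows.append(list(padded[:n_cols]))
--     return rows
-- ===== SOURCE B (Python) =====
-- import math
-- import typing
--
-- def column_wrap(
--     items: typing.Sequence[object],
--     n_cols: int,
--     filler: typing.Optional[str] = None,
-- ) -> typing.List[typing.List[typing.Optional[object]]]:
--     '''Build the n_cols columns as contiguous slices (column-major layout),
--        then transpose them row by row, padding short columns with filler.'''
--     n_rows = math.ceil(len(items) / n_cols)
--     cols = [items[c * n_rows:(c + 1) * n_rows] for c in range(n_cols)]
--     return [[cols[c][r] if r < len(cols[c]) else filler for c in range(n_cols)]
--             for r in range(n_rows)]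
-- ===== Notes on version B (the rewrite author's own statement) =====
-- stated objective: alternative
-- what changed: A builds each row with a strided slice items[row::n_rows] then pads and truncates; B builds the n_cols columns once as contiguous slices and transposes them, padding short columns per element.
import Mathlib
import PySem

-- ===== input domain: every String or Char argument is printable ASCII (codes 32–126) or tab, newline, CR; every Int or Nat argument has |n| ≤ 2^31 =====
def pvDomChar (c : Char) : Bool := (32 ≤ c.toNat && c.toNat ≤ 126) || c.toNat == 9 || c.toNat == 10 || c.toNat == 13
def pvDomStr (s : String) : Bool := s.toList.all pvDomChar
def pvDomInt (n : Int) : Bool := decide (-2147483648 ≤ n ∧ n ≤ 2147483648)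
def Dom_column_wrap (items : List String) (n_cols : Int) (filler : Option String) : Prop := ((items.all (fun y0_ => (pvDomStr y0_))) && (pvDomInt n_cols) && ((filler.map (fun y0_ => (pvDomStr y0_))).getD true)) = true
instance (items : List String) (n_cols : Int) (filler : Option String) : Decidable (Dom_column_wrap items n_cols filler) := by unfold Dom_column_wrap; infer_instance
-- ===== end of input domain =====

-- B replaces A's per-row strided slice + pad/truncate by building the n_cols contiguous
-- columns once and transposing them (objective: alternative decomposition, same cost).

-- ===== PORT A =====
-- math.ceil(len(items) / n_cols) is exact on Dom (|values| ≤ 2^31, so the float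
-- division cannot cross an integer); ported as -((-len) // n_cols).
-- items[row::n_rows]: slice? returns none only for step = 0, which the loop never
-- reaches (row ∈ range(n_rows) forces n_rows ≥ 1), so .getD [] is exact.
def column_wrap (items : List String) (n_cols : Int) (filler : Option String) : List (List (Option String)) :=
  let n_rows : Int := -(PySem.Int.floordiv (-(items.length : Int)) n_cols)
  (PySem.List.pyRange 0 n_rows 1).foldl
    (fun rows row =>
      let row_items := (PySem.List.slice? items (some row) none n_rows).getD []
      let padded : List (Option String) := row_items.map some ++ List.replicate n_cols.toNat filler
      rows ++ [PySem.List.slice padded none (some n_cols)]) []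

-- ===== PORT B =====
def column_wrap_alt (items : List String) (n_cols : Int) (filler : Option String) : List (List (Option String)) :=
  let n_rows : Int := -(PySem.Int.floordiv (-(items.length : Int)) n_cols)
  let cols := (PySem.List.pyRange 0 n_cols 1).map
    (fun c => PySem.List.slice items (some (c * n_rows)) (some ((c + 1) * n_rows)))
  (PySem.List.pyRange 0 n_rows 1).map
    (fun r => cols.map
      (fun col => if r < (col.length : Int) then PySem.List.pyGet? col r else filler))

-- ===== PRECONDITION & SPEC =====
-- Pre_ excludes only n_cols = 0, where the Python A raises ZeroDivisionError.
def Pre_column_wrap (items : List String) (n_cols : Int) (filler : Option String) : Prop := n_cols ≠ 0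
instance (items : List String) (n_cols : Int) (filler : Option String) : Decidable (Pre_column_wrap items n_cols filler) := by unfold Pre_column_wrap; infer_instance
def pvWitness_column_wrap : List String × Int × Option String := (["a", "b", "c"], 2, some "-")
def Spec_column_wrap (items : List String) (n_cols : Int) (filler : Option String) (out : List (List (Option String))) : Prop := out = column_wrap_alt items n_cols filler
instance (items : List String) (n_cols : Int) (filler : Option String) (out : List (List (Option String))) : Decidable (Spec_column_wrap items n_cols filler out) := by unfold Spec_column_wrap; infer_instance

-- ===== CLAIM (what is proved, stated in full; the proofs are below) =====
def Claim_equal_column_wrap : Prop := ∀ (items : List String) (n_cols : Int) (filler : Option String), Dom_column_wrap items n_cols filler → Pre_column_wrap items n_cols filler → Spec_column_wrap items n_cols filler (column_wrap items n_cols filler)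

-- ===== LEMMAS AND PROOFS =====

-- floor division by a negative divisor, both arguments negated
theorem pv_neg_fdiv_neg (a b : Int) (hb : b < 0) : (-a).fdiv b = a.fdiv (-b) := by
  rw [Int.neg_fdiv]
  rw [show a.fdiv b = a.fdiv (-(-b)) by ring_nf, Int.fdiv_neg (by omega : -b ≠ 0)]
  have hd : b ∣ a ↔ -b ∣ a := (neg_dvd (α := Int)).symm
  by_cases h : b ∣ a <;> simp_all [← hd] <;> omega

-- the accumulator loop of A's port is a map
theorem pv_foldl_append_singleton {α β : Type} (f : α → β) (xs : List α) (acc : List β) :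
    xs.foldl (fun a x => a ++ [f x]) acc = acc ++ xs.map f := by
  induction xs generalizing acc with
  | nil => simp
  | cons y ys ih => simp [List.foldl_cons, ih]

-- k < ⌈x / N⌉ ↔ N*k < x  (for 0 < N), with the ceiling written as (x + N - 1) / N
theorem pv_lt_ceil_iff (x N k : Int) (hN : 0 < N) : k < (x + N - 1) / N ↔ N * k < x := by
  rw [Int.lt_iff_add_one_le, Int.le_ediv_iff_mul_le hN]
  constructor <;> intro h <;> nlinarith

theorem pv_row_eq (items : List String) (filler : Option String) (C N r : Int)
    (hC : 0 < C) (hr0 : 0 ≤ r) (hrN : r < N) (hNL : N ≤ (items.length : Int)) :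
    PySem.List.slice
      (((PySem.List.slice? items (some r) none N).getD []).map some ++ List.replicate C.toNat filler)
      none (some C)
    = ((PySem.List.pyRange 0 C 1).map
        (fun c => PySem.List.slice items (some (c * N)) (some ((c + 1) * N)))).map
        (fun col => if r < (col.length : Int) then PySem.List.pyGet? col r else filler) := by
  have hN0 : 0 < N := by omega
  set L := items.length with hLdef
  have hrL : r < (L : Int) := by omega
  -- unfold the strided slice
  have hslice : (PySem.List.slice? items (some r) none N).getD []
      = List.filterMap (fun k : Nat => items[(r + N * (k : Int)).toNat]?)
          (List.range (((L : Int) - r + N - 1) / N).toNat) := by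
    simp only [PySem.List.slice?, PySem.List.sliceIndices]
    rw [if_neg (by omega : ¬ N = 0)]
    simp only [if_neg (by omega : ¬ N < 0)]
    rw [if_pos hN0]
    rw [if_neg (by omega : ¬ r < 0)]
    rw [min_eq_left (by omega : r ≤ (L : Int))]
    rw [if_pos hrL]
    simp [← hLdef]
  set K : Nat := (((L : Int) - r + N - 1) / N).toNat with hKdef
  set nN : Nat := N.toNat with hnN
  set r' : Nat := r.toNat with hr'
  have hNcast : (nN : Int) = N := Int.toNat_of_nonneg (by omega)
  have hrcast : (r' : Int) = r := Int.toNat_of_nonneg hr0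
  have hrnN : r' < nN := by omega
  have hidx : ∀ j : Nat, (r + N * (j : Int)).toNat = j * nN + r' := by
    intro j
    rw [← hNcast, ← hrcast]
    rw [show (r' : Int) + (nN : Int) * (j : Int) = ((j * nN + r' : Nat) : Int) by push_cast; ring]
    exact Int.toNat_natCast _
  have hcond : ∀ j : Nat, (j < K ↔ j * nN + r' < L) := by
    intro j
    rw [hKdef, Int.lt_toNat, pv_lt_ceil_iff _ _ _ hN0, ← hNcast, ← hrcast]
    zify
    constructor <;> intro h <;> nlinarith
  rw [hslice]
  have hmap : List.filterMap (fun k : Nat => items[(r + N * (k : Int)).toNat]?) (List.range K)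
      = (List.range K).map (fun k => items.getD (k * nN + r') "") := by
    rw [List.filterMap_congr (g := fun k : Nat => some (items.getD (k * nN + r') ""))]
    · simp
    · intro k hk
      simp only [List.mem_range] at hk
      have hlt : k * nN + r' < L := (hcond k).mp hk
      rw [hidx k, List.getElem?_eq_getElem hlt, List.getD_eq_getElem _ _ hlt]
  rw [hmap]
  rw [PySem.List.slice_to _ (by omega : (0:Int) ≤ C)]
  rw [PySem.List.pyRange_one 0 C]
  set C' : Nat := C.toNat with hC'
  have hCz : ((C : Int) - 0).toNat = C' := by omega
  apply List.ext_getElem?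
  intro j
  by_cases hjC : j < C'
  · -- both sides defined
    have ha : ((j : Int) * N).toNat = j * nN := by
      rw [← hNcast, ← Nat.cast_mul, Int.toNat_natCast]
    have hbN : ((j : Int) + 1) * N = (((j + 1) * nN : Nat) : Int) := by
      rw [← hNcast]; push_cast; ring
    have ht : (j + 1) * nN - j * nN = nN := by rw [Nat.succ_mul]; omega
    rw [List.getElem?_take]
    rw [if_pos (by simpa [hC'] using hjC)]
    simp only [List.map_map, List.getElem?_map]
    rw [List.getElem?_range (by omega : j < ((C : Int) - 0).toNat)]
    simp only [Option.map_some, Function.comp]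
    rw [show (0 : Int) + (j : Nat) = (j : Int) by ring]
    rw [PySem.List.slice_toNat _ (mul_nonneg (by positivity) (by omega)) (mul_nonneg (by positivity) (by omega))]
    rw [ha, hbN, Int.toNat_natCast, ht]
    have hlen : ((items.drop (j * nN)).take nN).length = min nN (L - j * nN) := by
      simp [← hLdef]
    by_cases hjK : j < K
    · have hin : j * nN + r' < L := (hcond j).mp hjK
      rw [List.getElem?_append_left (by simpa using hjK)]
      simp only [List.getElem?_map]
      rw [List.getElem?_range hjK]
      rw [if_pos (by rw [hlen, ← hrcast]; exact_mod_cast (by omega : r' < min nN (L - j * nN)))]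
      rw [← hrcast, PySem.List.pyGet?_natCast]
      rw [List.getElem?_take, if_pos hrnN, List.getElem?_drop]
      rw [List.getElem?_eq_getElem hin]
      simp [List.getElem?_eq_getElem hin]
    · have hout : ¬ (j * nN + r' < L) := fun h => hjK ((hcond j).mpr h)
      rw [List.getElem?_append_right (by simpa using hjK)]
      rw [List.getElem?_replicate]
      rw [if_pos (by simp; omega)]
      rw [if_neg (by rw [hlen, ← hrcast]; exact_mod_cast (by omega : ¬ r' < min nN (L - j * nN)))]
  · -- out of range: both none
    rw [List.getElem?_take, if_neg (by simpa [hC'] using hjC)]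
    rw [List.map_map, List.getElem?_map]
    rw [List.getElem?_eq_none (by simp; omega)]
    rfl

theorem cw_main (items : List String) (n_cols : Int) (filler : Option String)
    (hpre : n_cols ≠ 0) : column_wrap items n_cols filler = column_wrap_alt items n_cols filler := by
  unfold column_wrap column_wrap_alt
  simp only [PySem.Int.floordiv]
  set N : Int := -((-(items.length : Int)).fdiv n_cols) with hN
  by_cases hC : 0 < n_cols
  · by_cases hL : items.length = 0
    · have : N = 0 := by rw [hN, hL]; simp
      rw [this]
      simp [PySem.List.pyRange_one_eq_nil (by omega : (0:Int) ≤ 0)]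
    · -- the main case: n_cols > 0, items nonempty
      have hediv : (-(items.length : Int)).fdiv n_cols = (-(items.length : Int)) / n_cols := by
        rw [Int.fdiv_eq_ediv]
        simp [Int.le_of_lt hC]
      have hkey : n_cols * N = (items.length : Int) + (-(items.length : Int)) % n_cols := by
        rw [hN, hediv, mul_neg]
        have := Int.mul_ediv_add_emod (-(items.length : Int)) n_cols
        omega
      have hr0 : 0 ≤ (-(items.length : Int)) % n_cols := Int.emod_nonneg _ (by omega)
      have hrC : (-(items.length : Int)) % n_cols < n_cols := Int.emod_lt_of_pos _ hC
      have hN1 : 1 ≤ N := by nlinarith [hkey, (by omega : 1 ≤ (items.length : Int))]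
      have hNL : N ≤ (items.length : Int) := by nlinarith [hkey]
      rw [pv_foldl_append_singleton]
      simp only [List.nil_append]
      apply List.map_congr_left
      intro r hr
      have hr' := (PySem.List.mem_pyRange_one).mp hr
      exact pv_row_eq items filler n_cols N r hC (by omega) (by omega) hNL
  · have hClt : n_cols < 0 := by omega
    have hfd : 0 ≤ (-(items.length : Int)).fdiv n_cols := by
      rw [pv_neg_fdiv_neg _ _ hClt]
      exact Int.fdiv_nonneg (by positivity) (by omega)
    rw [PySem.List.pyRange_one_eq_nil (by omega : N ≤ 0)]
    simp

-- ===== VERDICT (by name: the statement is the Claim_ definition above) =====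
theorem column_wrap_spec : Claim_equal_column_wrap := by
  intro items n_cols filler _ hpre
  unfold Spec_column_wrap
  exact cw_main items n_cols filler hpre
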